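-- pv_equiv track=rewrite | github.com/Praveen-Kumar-SGK/SGK | extractor/aldi_pdf_new.py | separate_nutrition
-- ===== SOURCE A (Python) =====
-- def separate_nutrition(nutrition_keys, nutrition_values):
--     st_id = []
--     for i in range(len(nutrition_keys)):
--         if nutrition_keys[i] == 'Energy' and nutrition_keys[i - 1] != 'Energy':
--             st_id.append(i)
--
--     nutrition_tables = []
--     if st_id:
--         for i in range(len(st_id)):
--             try:
--                 temp_keys = nutrition_keys[st_id[i]:st_id[i + 1]]
--                 temp_values = nutrition_values[st_id[i]:st_id[i + 1]]
--                 nutrition_tables.append(multi_key_value(temp_keys, temp_values))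
--             except IndexError:
--                 temp_keys = nutrition_keys[st_id[i]:]
--                 temp_values = nutrition_values[st_id[i]:]
--                 nutrition_tables.append(multi_key_value(temp_keys, temp_values))
--     else:
--         nutrition_tables.append(multi_key_value(nutrition_keys, nutrition_values))
--
--     return nutrition_tables
--
-- def multi_key_value(keys, values):
--     file = {}
--     for i in range(len(keys)):
--         file.setdefault(keys[i], []).extend(values[i])
--     return file
-- ===== SOURCE B (Python) =====
-- def separate_nutrition(nutrition_keys, nutrition_values):
--     # Single streaming pass: flush the running segment each time an Energy
--     # marker starts a new table, instead of collecting indices and slicing.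
--     tables = []
--     current = None
--     for i, key in enumerate(nutrition_keys):
--         if key == 'Energy' and nutrition_keys[i - 1] != 'Energy':
--             if current is not None:
--                 tables.append(_make_table(current))
--             current = []
--         if current is not None:
--             current.append((key, nutrition_values[i]))
--     if current is not None:
--         tables.append(_make_table(current))
--     else:
--         tables.append(_make_table(list(zip(nutrition_keys, nutrition_values))))
--     return tables
--
-- def _make_table(pairs):
--     table = {}
--     for k, v in pairs:
--         table.setdefault(k, []).extend(v)
--     return table
-- ===== Notes on version B (the rewrite author's own statement) =====
-- stated objective: simpler
-- what changed: Replaces the two-phase scheme (collect Energy start indices, then slice both lists with try/except for the last segment) by one streaming pass that flushes the running segment whenever a marker starts a new table.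
import Mathlib
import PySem

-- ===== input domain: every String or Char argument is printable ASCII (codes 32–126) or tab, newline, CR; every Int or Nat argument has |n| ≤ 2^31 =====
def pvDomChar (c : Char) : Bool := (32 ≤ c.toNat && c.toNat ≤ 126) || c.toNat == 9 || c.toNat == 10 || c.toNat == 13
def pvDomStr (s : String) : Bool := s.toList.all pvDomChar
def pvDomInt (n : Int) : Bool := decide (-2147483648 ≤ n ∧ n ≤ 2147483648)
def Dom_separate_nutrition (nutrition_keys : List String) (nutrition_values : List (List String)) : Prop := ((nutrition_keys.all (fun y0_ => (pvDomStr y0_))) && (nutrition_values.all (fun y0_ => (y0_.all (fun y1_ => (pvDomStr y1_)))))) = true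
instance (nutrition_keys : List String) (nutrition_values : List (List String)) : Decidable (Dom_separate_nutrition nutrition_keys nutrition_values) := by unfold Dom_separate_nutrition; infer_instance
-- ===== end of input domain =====

-- B replaces A's two-phase scheme (collect Energy start indices, then slice with try/except)
-- by a single streaming pass that flushes the running segment at each marker (objective: simpler).

-- ===== PORT A =====
-- dict built by file.setdefault(keys[i], []).extend(values[i]); returned as its items list
def multi_key_value (keys : List String) (values : List (List String)) : List (String × List String) :=
  ((PySem.List.pyRange 0 (keys.length : Int) 1).foldl
    (fun file i =>
      file.modify (PySem.List.pyGetD keys i "") [] (· ++ PySem.List.pyGetD values i []))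
    PySem.Dict.empty).items

def separate_nutrition (nutrition_keys : List String) (nutrition_values : List (List String)) : List (List (String × List String)) :=
  let st_id : List Int := (PySem.List.pyRange 0 (nutrition_keys.length : Int) 1).foldl
    (fun acc i =>
      if PySem.List.pyGetD nutrition_keys i "" == "Energy"
          && !(PySem.List.pyGetD nutrition_keys (i - 1) "" == "Energy")
      then acc ++ [i] else acc) []
  if st_id.isEmpty then
    [multi_key_value nutrition_keys nutrition_values]
  else
    (PySem.List.pyRange 0 (st_id.length : Int) 1).foldl
      (fun tabs i => tabs ++
        -- try: slice to st_id[i+1]; except IndexError (st_id[i+1] out of range): slice to the end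
        [match PySem.List.pyGet? st_id (i + 1) with
          | some e => multi_key_value
              (PySem.List.slice nutrition_keys (some (PySem.List.pyGetD st_id i 0)) (some e))
              (PySem.List.slice nutrition_values (some (PySem.List.pyGetD st_id i 0)) (some e))
          | none => multi_key_value
              (PySem.List.slice nutrition_keys (some (PySem.List.pyGetD st_id i 0)) none)
              (PySem.List.slice nutrition_values (some (PySem.List.pyGetD st_id i 0)) none)]) []

-- ===== PORT B =====
-- _make_table(pairs)
def pvMakeTable (pairs : List (String × List String)) : List (String × List String) :=
  (pairs.foldl (fun t p => t.modify p.1 [] (· ++ p.2)) PySem.Dict.empty).items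

-- the body of B's single for-loop over enumerate(nutrition_keys)
def pvStepB (nutrition_keys : List String) (nutrition_values : List (List String))
    (st : List (List (String × List String)) × Option (List (String × List String)))
    (ik : Int × String) :
    List (List (String × List String)) × Option (List (String × List String)) :=
  let st1 := if ik.2 == "Energy"
      && !(PySem.List.pyGetD nutrition_keys (ik.1 - 1) "" == "Energy") then
      (match st.2 with
        | some c => (st.1 ++ [pvMakeTable c], some ([] : List (String × List String)))
        | none => (st.1, some ([] : List (String × List String))))
    else st
  match st1.2 with
  | some c => (st1.1, some (c ++ [(ik.2, PySem.List.pyGetD nutrition_values ik.1 [])]))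
  | none => st1

def separate_nutrition_alt (nutrition_keys : List String) (nutrition_values : List (List String)) : List (List (String × List String)) :=
  let res := (PySem.List.enumerate nutrition_keys 0).foldl
    (pvStepB nutrition_keys nutrition_values) ([], none)
  match res.2 with
  | some c => res.1 ++ [pvMakeTable c]
  | none => [pvMakeTable (nutrition_keys.zip nutrition_values)]

-- ===== PRECONDITION & SPEC =====
-- A raises IndexError (inside multi_key_value) exactly when there are fewer value rows than keys.
def Pre_separate_nutrition (nutrition_keys : List String) (nutrition_values : List (List String)) : Prop :=
  nutrition_keys.length ≤ nutrition_values.length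
instance (nutrition_keys : List String) (nutrition_values : List (List String)) : Decidable (Pre_separate_nutrition nutrition_keys nutrition_values) := by unfold Pre_separate_nutrition; infer_instance

def pvWitness_separate_nutrition : List String × List (List String) :=
  (["Energy", "Fat", "Energy"], [["100kJ"], ["5g"], ["200kJ"]])

def Spec_separate_nutrition (nutrition_keys : List String) (nutrition_values : List (List String)) (out : List (List (String × List String))) : Prop := out = separate_nutrition_alt nutrition_keys nutrition_values
instance (nutrition_keys : List String) (nutrition_values : List (List String)) (out : List (List (String × List String))) : Decidable (Spec_separate_nutrition nutrition_keys nutrition_values out) := by unfold Spec_separate_nutrition; infer_instance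

-- ===== CLAIM (what is proved, stated in full; the proofs are below) =====
def Claim_equal_separate_nutrition : Prop := ∀ (nutrition_keys : List String) (nutrition_values : List (List String)), Dom_separate_nutrition nutrition_keys nutrition_values → Pre_separate_nutrition nutrition_keys nutrition_values → Spec_separate_nutrition nutrition_keys nutrition_values (separate_nutrition nutrition_keys nutrition_values)

-- ===== LEMMAS AND PROOFS =====

-- the marker condition of both programs, as a function of the index
def pvCond (keys : List String) (i : Int) : Bool :=
  PySem.List.pyGetD keys i "" == "Energy" && !(PySem.List.pyGetD keys (i - 1) "" == "Energy")

-- A's table for one marker with optional next marker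
def pvTblA (keys : List String) (values : List (List String)) (a : Int) (b? : Option Int) :
    List (String × List String) :=
  match b? with
  | some e => multi_key_value
      (PySem.List.slice keys (some a) (some e)) (PySem.List.slice values (some a) (some e))
  | none => multi_key_value
      (PySem.List.slice keys (some a) none) (PySem.List.slice values (some a) none)

-- the segment of ps from start a to optional next start b
def pvSeg (ps : List (String × List String)) (a : Int) (b? : Option Int) : List (String × List String) :=
  match b? with
  | some b => (ps.drop a.toNat).take (b - a).toNat
  | none => ps.drop a.toNat

-- g applied to each element together with its successor in the list
def pvConsecMap {β : Type} (g : Int → Option Int → β) : List Int → List β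
  | [] => []
  | a :: r => g a r.head? :: pvConsecMap g r

-- B's segment stream, processing keys-suffix l at absolute index j with open segment acc
def pvRunOpen (C : Int → Bool) (ps : List (String × List String)) :
    List String → Nat → List (String × List String) → List (List (String × List String))
  | [], _, acc => [acc]
  | _ :: l, j, acc =>
    if C j then acc :: pvRunOpen C ps l (j + 1) [ps.getD j ("", [])]
    else pvRunOpen C ps l (j + 1) (acc ++ [ps.getD j ("", [])])

def pvRunClosed (C : Int → Bool) (ps : List (String × List String)) :
    List String → Nat → Option (List (List (String × List String)))
  | [], _ => none
  | _ :: l, j =>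
    if C j then some (pvRunOpen C ps l (j + 1) [ps.getD j ("", [])])
    else pvRunClosed C ps l (j + 1)

theorem pv_zip_drop {α β : Type} (xs : List α) (ys : List β) (n : Nat) :
    (xs.drop n).zip (ys.drop n) = (xs.zip ys).drop n := by
  simp [List.zip_eq_zipWith, List.drop_zipWith]

theorem pv_zip_take {α β : Type} (xs : List α) (ys : List β) (n : Nat) :
    (xs.take n).zip (ys.take n) = (xs.zip ys).take n := by
  simp [List.zip_eq_zipWith, List.take_zipWith]

-- A's inner dict loop over indices is B's dict loop over the zipped pairs
theorem pv_mkv_eq (ks : List String) (vs : List (List String)) (h : ks.length ≤ vs.length) :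
    multi_key_value ks vs = pvMakeTable (ks.zip vs) := by
  unfold multi_key_value pvMakeTable
  congr 1
  have hlen : (ks.zip vs).length = ks.length := by
    simp [List.length_zip]; omega
  have h1 : ∀ (d : PySem.Dict String (List String)) (i : Int),
      i ∈ PySem.List.pyRange 0 (ks.length : Int) 1 →
      d.modify (PySem.List.pyGetD ks i "") [] (· ++ PySem.List.pyGetD vs i [])
      = (fun (t : PySem.Dict String (List String)) (p : String × List String) =>
          t.modify p.1 [] (· ++ p.2)) d (PySem.List.pyGetD (ks.zip vs) i ("", [])) := by
    intro d i hi
    rw [PySem.List.mem_pyRange_one] at hi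
    obtain ⟨h0, hlt⟩ := hi
    rw [show i = ((i.toNat : Nat) : Int) by omega]
    rw [PySem.List.pyGetD_natCast, PySem.List.pyGetD_natCast, PySem.List.pyGetD_natCast]
    rw [List.getD_eq_getElem ks _ (by omega), List.getD_eq_getElem vs _ (by omega),
        List.getD_eq_getElem (ks.zip vs) _ (by omega)]
    simp [List.getElem_zip]
  refine (PySem.List.foldl_congr_mem _ _ _ _ h1).trans ?_
  rw [show ((ks.length : Int)) = ((ks.zip vs).length : Int) by rw [hlen]]
  exact PySem.List.foldl_pyRange_zero_pyGetD' (ks.zip vs) ("", [])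
    (fun t p => t.modify p.1 [] (· ++ p.2)) PySem.Dict.empty

-- indexing consecutive pairs of a list through pyGetD/pyGet? is pvConsecMap
theorem pv_consec {β : Type} (g : Int → Option Int → β) (st : List Int) :
    (PySem.List.pyRange 0 (st.length : Int) 1).map
      (fun i => g (PySem.List.pyGetD st i 0) (PySem.List.pyGet? st (i + 1))) = pvConsecMap g st := by
  induction st with
  | nil => simp [pvConsecMap, PySem.List.pyRange_one_eq_nil]
  | cons a r ih =>
    have hcons : PySem.List.pyRange 0 (((a :: r).length : Int)) 1
        = 0 :: PySem.List.pyRange 1 (((a :: r).length : Int)) 1 := by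
      apply PySem.List.pyRange_one_cons; simp
    rw [hcons, List.map_cons]
    have hhead : g (PySem.List.pyGetD (a :: r) 0 0) (PySem.List.pyGet? (a :: r) (0 + 1)) = g a r.head? := by
      rw [PySem.List.pyGetD_zero_cons]
      congr 1
      rw [show (0 + 1 : Int) = ((0 : Nat) : Int) + 1 by norm_num, PySem.List.pyGet?_cons_succ]
      simp [PySem.List.pyGet?_zero, List.head?_eq_getElem?]
    rw [hhead, pvConsecMap, ← ih]
    congr 1
    rw [PySem.List.pyRange_one, PySem.List.pyRange_one]
    have e1 : (((a :: r).length : Int) - 1).toNat = r.length := by simp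
    have e2 : ((r.length : Int) - 0).toNat = r.length := by simp
    rw [e1, e2]
    simp only [List.map_map]
    apply List.map_congr_left
    intro k _
    simp only [Function.comp_apply]
    congr 1
    · rw [show (1 + (k : Int)) = (((k + 1 : Nat)) : Int) by omega,
          PySem.List.pyGetD_natCast]
      rw [show ((0 : Int) + (k : Int)) = ((k : Nat) : Int) by omega,
          PySem.List.pyGetD_natCast]
      simp [List.getD]
    · rw [show (1 + (k : Int) + 1) = (((k + 2 : Nat)) : Int) by omega,
          PySem.List.pyGet?_natCast]
      rw [show ((0 : Int) + (k : Int) + 1) = (((k + 1 : Nat)) : Int) by omega,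
          PySem.List.pyGet?_natCast]
      simp


-- A's sliced table for one marker pair is the table of the corresponding pvSeg of the zip
theorem pv_slice_seg (keys : List String) (values : List (List String))
    (h : keys.length ≤ values.length) (a : Int) (b? : Option Int)
    (ha : 0 ≤ a) (hb : ∀ b, b? = some b → 0 ≤ b) :
    pvTblA keys values a b? = pvMakeTable (pvSeg (keys.zip values) a b?) := by
  unfold pvTblA
  cases b? with
  | none =>
    simp only [pvSeg]
    rw [show a = ((a.toNat : Nat) : Int) by omega]
    rw [PySem.List.slice_from_natCast, PySem.List.slice_from_natCast]
    rw [pv_mkv_eq _ _ (by simp [List.length_drop]; omega)]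
    rw [pv_zip_drop]
    simp only [Int.toNat_natCast]
  | some b =>
    have hb : (0:Int) ≤ b := hb b rfl
    simp only [pvSeg]
    rw [show a = ((a.toNat : Nat) : Int) by omega, show b = ((b.toNat : Nat) : Int) by omega]
    rw [PySem.List.slice_natCast, PySem.List.slice_natCast]
    rw [pv_mkv_eq _ _ (by simp [List.length_take, List.length_drop]; omega)]
    rw [pv_zip_take, pv_zip_drop]
    simp only [Int.toNat_natCast]
    have h1 : (((b.toNat : Int)) - ((a.toNat : Int))).toNat = b.toNat - a.toNat := by omega
    rw [h1]

theorem pv_consec_seg (keys : List String) (values : List (List String))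
    (h : keys.length ≤ values.length) (st : List Int) (hst : ∀ x ∈ st, 0 ≤ x) :
    pvConsecMap (pvTblA keys values) st
    = (pvConsecMap (pvSeg (keys.zip values)) st).map pvMakeTable := by
  induction st with
  | nil => simp [pvConsecMap]
  | cons a r ih =>
    simp only [pvConsecMap, List.map_cons]
    congr 1
    · exact pv_slice_seg keys values h a r.head? (hst a (by simp))
        (fun b hbb => hst b (by cases r with
          | nil => simp at hbb
          | cons x xs => simp at hbb; simp [hbb]))
    · exact ih (fun x hx => hst x (by simp [hx]))

-- characterization of A
theorem pv_A_char (keys : List String) (values : List (List String))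
    (h : keys.length ≤ values.length) :
    separate_nutrition keys values
    = match (PySem.List.pyRange 0 (keys.length : Int) 1).filter (pvCond keys) with
      | [] => [pvMakeTable (keys.zip values)]
      | b :: r => (pvConsecMap (pvSeg (keys.zip values)) (b :: r)).map pvMakeTable := by
  unfold separate_nutrition
  have hst : (PySem.List.pyRange 0 (keys.length : Int) 1).foldl
      (fun acc i => if PySem.List.pyGetD keys i "" == "Energy"
          && !(PySem.List.pyGetD keys (i - 1) "" == "Energy") then acc ++ [i] else acc) []
      = (PySem.List.pyRange 0 (keys.length : Int) 1).filter (pvCond keys) := by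
    rw [PySem.List.foldl_append_if_eq_filter]
    rfl
  simp only [hst]
  cases hm : (PySem.List.pyRange 0 (keys.length : Int) 1).filter (pvCond keys) with
  | nil =>
    simp [List.isEmpty_nil, pv_mkv_eq keys values h]
  | cons b r =>
    simp only [List.isEmpty_cons]
    have hbody : ∀ (tabs : List (List (String × List String))) (i : Int),
        i ∈ PySem.List.pyRange 0 (((b :: r).length : Int)) 1 →
        (fun tabs i => tabs ++
          [match PySem.List.pyGet? (b :: r) (i + 1) with
            | some e => multi_key_value
                (PySem.List.slice keys (some (PySem.List.pyGetD (b :: r) i 0)) (some e))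
                (PySem.List.slice values (some (PySem.List.pyGetD (b :: r) i 0)) (some e))
            | none => multi_key_value
                (PySem.List.slice keys (some (PySem.List.pyGetD (b :: r) i 0)) none)
                (PySem.List.slice values (some (PySem.List.pyGetD (b :: r) i 0)) none)]) tabs i
        = tabs ++ [pvTblA keys values (PySem.List.pyGetD (b :: r) i 0)
            (PySem.List.pyGet? (b :: r) (i + 1))] := by
      intro tabs i _
      rfl
    have hbnd : ∀ x ∈ (b :: r), (0:Int) ≤ x := by
      intro x hx
      have hx2 : x ∈ (PySem.List.pyRange 0 (keys.length : Int) 1).filter (pvCond keys) := by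
        rw [hm]; exact hx
      have hx3 := List.mem_of_mem_filter hx2
      rw [PySem.List.mem_pyRange_one] at hx3
      omega
    rw [PySem.List.foldl_congr_mem _ _ _ _ hbody]
    rw [PySem.List.foldl_append_singleton_eq_map]
    rw [pv_consec (pvTblA keys values) (b :: r)]
    rw [pv_consec_seg keys values h (b :: r) hbnd]
    simp

-- B's loop starting with an open segment
theorem pv_B_open (keys : List String) (values : List (List String))
    (h : keys.length ≤ values.length) :
    ∀ (l : List String) (j : Nat), keys.drop j = l →
    ∀ (tabs : List (List (String × List String))) (acc : List (String × List String)),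
    ∃ t c, (PySem.List.enumerate l (j : Int)).foldl (pvStepB keys values) (tabs, some acc) = (t, some c) ∧
      t ++ [pvMakeTable c]
        = tabs ++ (pvRunOpen (pvCond keys) (keys.zip values) l j acc).map pvMakeTable := by
  intro l
  induction l with
  | nil =>
    intro j _ tabs acc
    exact ⟨tabs, acc, by simp [PySem.List.enumerate], by simp [pvRunOpen]⟩
  | cons k l' ih =>
    intro j hl tabs acc
    have hj : j < keys.length := by
      have := congrArg List.length hl
      simp [List.length_drop] at this
      omega
    have hkv : j < values.length := by omega
    have hk : keys[j] = k := by
      have h0 : (keys.drop j)[0]? = some k := by rw [hl]; rfl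
      rw [List.getElem?_drop, Nat.add_zero, List.getElem?_eq_getElem hj] at h0
      exact Option.some.inj h0
    have hl' : keys.drop (j + 1) = l' := by
      have : (keys.drop j).drop 1 = l' := by rw [hl]; rfl
      rwa [List.drop_drop] at this
    have hcons : PySem.List.enumerate (k :: l') (j : Int)
        = ((j : Int), k) :: PySem.List.enumerate l' ((j + 1 : Nat) : Int) := by
      rw [PySem.List.enumerate_cons]
      norm_cast
    have hgk : PySem.List.pyGetD keys (j : Int) "" = k := by
      rw [PySem.List.pyGetD_natCast, List.getD_eq_getElem keys _ hj, hk]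
    have hgv : PySem.List.pyGetD values (j : Int) [] = values[j] := by
      rw [PySem.List.pyGetD_natCast, List.getD_eq_getElem values _ hkv]
    have hzj : (keys.zip values)[j]?.getD ("", []) = (k, values[j]) := by
      rw [List.getElem?_eq_getElem (by simp [List.length_zip]; omega)]
      simp [List.getElem_zip, hk]
    have hcond : (k == "Energy"
        && !(PySem.List.pyGetD keys ((j : Int) - 1) "" == "Energy")) = pvCond keys j := by
      rw [pvCond, hgk]
    rw [hcons, List.foldl_cons]
    by_cases hc : pvCond keys (j : Int) = true
    · have hstep : pvStepB keys values (tabs, some acc) ((j : Int), k)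
          = (tabs ++ [pvMakeTable acc], some [(keys.zip values).getD j ("", [])]) := by
        unfold pvStepB
        simp only [hcond, hc, if_pos]
        simp [hgv, hzj]
      rw [hstep]
      obtain ⟨t, c, he, hv⟩ := ih (j + 1) hl' (tabs ++ [pvMakeTable acc])
        [(keys.zip values).getD j ("", [])]
      refine ⟨t, c, he, ?_⟩
      rw [hv]
      simp only [pvRunOpen, hc, if_pos, List.map_cons]
      simp
    · have hstep : pvStepB keys values (tabs, some acc) ((j : Int), k)
          = (tabs, some (acc ++ [(keys.zip values).getD j ("", [])])) := by
        unfold pvStepB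
        simp only [hcond]
        simp only [hc]
        simp [hgv, hzj]
      rw [hstep]
      obtain ⟨t, c, he, hv⟩ := ih (j + 1) hl' tabs
        (acc ++ [(keys.zip values).getD j ("", [])])
      refine ⟨t, c, he, ?_⟩
      rw [hv]
      simp only [pvRunOpen, hc]
      simp

-- B's loop starting with no open segment
theorem pv_B_closed (keys : List String) (values : List (List String))
    (h : keys.length ≤ values.length) :
    ∀ (l : List String) (j : Nat), keys.drop j = l →
    match pvRunClosed (pvCond keys) (keys.zip values) l j with
    | none => (PySem.List.enumerate l (j : Int)).foldl (pvStepB keys values) ([], none) = ([], none)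
    | some segs => ∃ t c,
        (PySem.List.enumerate l (j : Int)).foldl (pvStepB keys values) ([], none) = (t, some c) ∧
        t ++ [pvMakeTable c] = segs.map pvMakeTable := by
  intro l
  induction l with
  | nil =>
    intro j _
    simp [pvRunClosed, PySem.List.enumerate]
  | cons k l' ih =>
    intro j hl
    have hj : j < keys.length := by
      have := congrArg List.length hl
      simp [List.length_drop] at this
      omega
    have hkv : j < values.length := by omega
    have hk : keys[j] = k := by
      have h0 : (keys.drop j)[0]? = some k := by rw [hl]; rfl
      rw [List.getElem?_drop, Nat.add_zero, List.getElem?_eq_getElem hj] at h0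
      exact Option.some.inj h0
    have hl' : keys.drop (j + 1) = l' := by
      have : (keys.drop j).drop 1 = l' := by rw [hl]; rfl
      rwa [List.drop_drop] at this
    have hcons : PySem.List.enumerate (k :: l') (j : Int)
        = ((j : Int), k) :: PySem.List.enumerate l' ((j + 1 : Nat) : Int) := by
      rw [PySem.List.enumerate_cons]
      norm_cast
    have hgk : PySem.List.pyGetD keys (j : Int) "" = k := by
      rw [PySem.List.pyGetD_natCast, List.getD_eq_getElem keys _ hj, hk]
    have hgv : PySem.List.pyGetD values (j : Int) [] = values[j] := by
      rw [PySem.List.pyGetD_natCast, List.getD_eq_getElem values _ hkv]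
    have hcond : (k == "Energy"
        && !(PySem.List.pyGetD keys ((j : Int) - 1) "" == "Energy")) = pvCond keys j := by
      rw [pvCond, hgk]
    have hzj : (keys.zip values)[j]?.getD ("", []) = (k, values[j]) := by
      rw [List.getElem?_eq_getElem (by simp [List.length_zip]; omega)]
      simp [List.getElem_zip, hk]
    rw [hcons, List.foldl_cons]
    by_cases hc : pvCond keys (j : Int) = true
    · have hstep : pvStepB keys values (([], none) :
          List (List (String × List String)) × Option (List (String × List String))) ((j : Int), k)
          = ([], some [(keys.zip values).getD j ("", [])]) := by
        unfold pvStepB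
        simp only [hcond, hc, if_pos]
        simp [hgv, hzj]
      rw [hstep]
      simp only [pvRunClosed, hc, if_pos]
      obtain ⟨t, c, he, hv⟩ := pv_B_open keys values h l' (j + 1) hl' []
        [(keys.zip values).getD j ("", [])]
      exact ⟨t, c, he, by rw [hv]; simp⟩
    · have hstep : pvStepB keys values (([], none) :
          List (List (String × List String)) × Option (List (String × List String))) ((j : Int), k)
          = ([], none) := by
        unfold pvStepB
        simp only [hcond]
        simp [hc]
      rw [hstep]
      have hrc : pvRunClosed (pvCond keys) (keys.zip values) (k :: l') j
          = pvRunClosed (pvCond keys) (keys.zip values) l' (j + 1) := by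
        simp only [pvRunClosed, hc]
        simp
      rw [hrc]
      exact ih (j + 1) hl' 

-- pvRunOpen in terms of the marker list
theorem pv_open_markers (keys : List String) (values : List (List String))
    (h : keys.length ≤ values.length) :
    ∀ (l : List String) (j : Nat), keys.drop j = l →
    ∀ (acc : List (String × List String)),
    pvRunOpen (pvCond keys) (keys.zip values) l j acc
    = match (PySem.List.pyRange (j : Int) (keys.length : Int) 1).filter (pvCond keys) with
      | [] => [acc ++ (keys.zip values).drop j]
      | b :: r => (acc ++ ((keys.zip values).drop j).take (b.toNat - j))
          :: pvConsecMap (pvSeg (keys.zip values)) (b :: r) := by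
  intro l
  induction l with
  | nil =>
    intro j hl acc
    have hj : keys.length ≤ j := by
      have := congrArg List.length hl
      simp [List.length_drop] at this
      omega
    have hr : PySem.List.pyRange (j : Int) (keys.length : Int) 1 = [] :=
      PySem.List.pyRange_one_eq_nil (by omega)
    rw [hr]
    have hd : (keys.zip values).drop j = [] := by
      rw [List.drop_eq_nil_iff]
      simp [List.length_zip]; omega
    simp [pvRunOpen, hd]
  | cons k l' ih =>
    intro j hl acc
    have hj : j < keys.length := by
      have := congrArg List.length hl
      simp [List.length_drop] at this
      omega
    have hk : keys[j] = k := by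
      have h0 : (keys.drop j)[0]? = some k := by rw [hl]; rfl
      rw [List.getElem?_drop, Nat.add_zero, List.getElem?_eq_getElem hj] at h0
      exact Option.some.inj h0
    have hl' : keys.drop (j + 1) = l' := by
      have : (keys.drop j).drop 1 = l' := by rw [hl]; rfl
      rwa [List.drop_drop] at this
    have hjz : j < (keys.zip values).length := by simp [List.length_zip]; omega
    have hdrop : (keys.zip values).drop j
        = (keys.zip values).getD j ("", []) :: (keys.zip values).drop (j + 1) := by
      rw [List.getD_eq_getElem _ _ hjz]
      exact List.drop_eq_getElem_cons hjz
    have hrcons : PySem.List.pyRange (j : Int) (keys.length : Int) 1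
        = (j : Int) :: PySem.List.pyRange ((j + 1 : Nat) : Int) (keys.length : Int) 1 := by
      rw [PySem.List.pyRange_one_cons (by omega)]
      norm_cast
    have hbmem : ∀ b ∈ (PySem.List.pyRange ((j + 1 : Nat) : Int) (keys.length : Int) 1).filter
        (pvCond keys), ((j : Int) + 1) ≤ b ∧ b < (keys.length : Int) := by
      intro b hb
      have := List.mem_of_mem_filter hb
      rw [PySem.List.mem_pyRange_one] at this
      omega
    rw [hrcons]
    by_cases hc : pvCond keys (j : Int) = true
    · rw [List.filter_cons_of_pos hc]
      simp only [pvRunOpen, hc, if_pos]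
      rw [ih (j + 1) hl' [(keys.zip values).getD j ("", [])]]
      cases hrest : (PySem.List.pyRange ((j + 1 : Nat) : Int) (keys.length : Int) 1).filter
          (pvCond keys) with
      | nil =>
        simp only [pvConsecMap, List.head?_nil]
        rw [show ((j : Int).toNat - j) = 0 by omega]
        simp only [List.take_zero, List.append_nil]
        rw [show pvSeg (keys.zip values) (j : Int) none = (keys.zip values).drop j from by
          simp [pvSeg]]
        rw [hdrop]
        simp
      | cons b r =>
        have hb := (hbmem b (by rw [hrest]; simp)).1
        simp only [pvConsecMap, List.head?_cons]
        rw [show ((j : Int).toNat - j) = 0 by omega]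
        simp only [List.take_zero, List.append_nil]
        rw [show pvSeg (keys.zip values) (j : Int) (some b)
            = ((keys.zip values).drop j).take (b.toNat - j) from by
          simp only [pvSeg, Int.toNat_natCast]
          congr 1
          omega]
        rw [hdrop, show b.toNat - j = (b.toNat - (j + 1)) + 1 by omega, List.take_succ_cons]
        simp
    · rw [List.filter_cons_of_neg hc]
      simp only [pvRunOpen, hc]
      rw [ih (j + 1) hl' (acc ++ [(keys.zip values).getD j ("", [])])]
      cases hrest : (PySem.List.pyRange ((j + 1 : Nat) : Int) (keys.length : Int) 1).filter
          (pvCond keys) with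
      | nil =>
        simp [hdrop]
      | cons b r =>
        have hb := (hbmem b (by rw [hrest]; simp)).1
        have htake : b.toNat - j = (b.toNat - (j + 1)) + 1 := by omega
        simp [hdrop, htake]

-- pvRunClosed in terms of the marker list
theorem pv_closed_markers (keys : List String) (values : List (List String))
    (h : keys.length ≤ values.length) :
    ∀ (l : List String) (j : Nat), keys.drop j = l →
    pvRunClosed (pvCond keys) (keys.zip values) l j
    = match (PySem.List.pyRange (j : Int) (keys.length : Int) 1).filter (pvCond keys) with
      | [] => none
      | b :: r => some (pvConsecMap (pvSeg (keys.zip values)) (b :: r)) := by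
  intro l
  induction l with
  | nil =>
    intro j hl
    have hj : keys.length ≤ j := by
      have := congrArg List.length hl
      simp [List.length_drop] at this
      omega
    rw [PySem.List.pyRange_one_eq_nil (by omega)]
    simp [pvRunClosed]
  | cons k l' ih =>
    intro j hl
    have hj : j < keys.length := by
      have := congrArg List.length hl
      simp [List.length_drop] at this
      omega
    have hk : keys[j] = k := by
      have h0 : (keys.drop j)[0]? = some k := by rw [hl]; rfl
      rw [List.getElem?_drop, Nat.add_zero, List.getElem?_eq_getElem hj] at h0
      exact Option.some.inj h0
    have hl' : keys.drop (j + 1) = l' := by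
      have : (keys.drop j).drop 1 = l' := by rw [hl]; rfl
      rwa [List.drop_drop] at this
    have hjz : j < (keys.zip values).length := by simp [List.length_zip]; omega
    have hdrop : (keys.zip values).drop j
        = (keys.zip values).getD j ("", []) :: (keys.zip values).drop (j + 1) := by
      rw [List.getD_eq_getElem _ _ hjz]
      exact List.drop_eq_getElem_cons hjz
    have hrcons : PySem.List.pyRange (j : Int) (keys.length : Int) 1
        = (j : Int) :: PySem.List.pyRange ((j + 1 : Nat) : Int) (keys.length : Int) 1 := by
      rw [PySem.List.pyRange_one_cons (by omega)]
      norm_cast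
    have hbmem : ∀ b ∈ (PySem.List.pyRange ((j + 1 : Nat) : Int) (keys.length : Int) 1).filter
        (pvCond keys), ((j : Int) + 1) ≤ b ∧ b < (keys.length : Int) := by
      intro b hb
      have := List.mem_of_mem_filter hb
      rw [PySem.List.mem_pyRange_one] at this
      omega
    rw [hrcons]
    by_cases hc : pvCond keys (j : Int) = true
    · rw [List.filter_cons_of_pos hc]
      simp only [pvRunClosed, hc, if_pos]
      rw [pv_open_markers keys values h l' (j + 1) hl' [(keys.zip values).getD j ("", [])]]
      cases hrest : (PySem.List.pyRange ((j + 1 : Nat) : Int) (keys.length : Int) 1).filter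
          (pvCond keys) with
      | nil =>
        simp only [pvConsecMap, List.head?_nil]
        rw [show pvSeg (keys.zip values) (j : Int) none = (keys.zip values).drop j from by
          simp [pvSeg]]
        rw [hdrop]
        simp
      | cons b r =>
        have hb := (hbmem b (by rw [hrest]; simp)).1
        simp only [pvConsecMap, List.head?_cons]
        rw [show pvSeg (keys.zip values) (j : Int) (some b)
            = ((keys.zip values).drop j).take (b.toNat - j) from by
          simp only [pvSeg, Int.toNat_natCast]
          congr 1
          omega]
        rw [hdrop, show b.toNat - j = (b.toNat - (j + 1)) + 1 by omega, List.take_succ_cons]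
        simp
    · rw [List.filter_cons_of_neg hc]
      simp only [pvRunClosed, hc]
      simp only [Bool.false_eq_true, if_false]
      exact ih (j + 1) hl' 

-- ===== VERDICT (by name: the statement is the Claim_ definition above) =====
theorem separate_nutrition_spec : Claim_equal_separate_nutrition := by
  intro keys values _hdom hpre
  unfold Spec_separate_nutrition
  have hpre' : keys.length ≤ values.length := hpre
  rw [pv_A_char keys values hpre']
  unfold separate_nutrition_alt
  have hBc := pv_B_closed keys values hpre' keys 0 (by simp)
  have hCm := pv_closed_markers keys values hpre' keys 0 (by simp)
  rw [show (((0 : Nat) : Int)) = (0 : Int) by norm_cast] at hBc hCm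
  cases hm : (PySem.List.pyRange 0 (keys.length : Int) 1).filter (pvCond keys) with
  | nil =>
    rw [hm] at hCm
    rw [hCm] at hBc
    have hBc2 : (PySem.List.enumerate keys 0).foldl (pvStepB keys values) ([], none)
        = ([], none) := hBc
    rw [hBc2]
  | cons b r =>
    rw [hm] at hCm
    rw [hCm] at hBc
    obtain ⟨t, c, he, hv⟩ := hBc
    rw [he]
    exact hv.symm
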